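-- pv_equiv track=rewrite | github.com/dmitry-pechersky/algorithms | hackerearth/Monk and Tree Counting.py | largest_smaller
-- ===== SOURCE A (Python) =====
-- def largest_smaller(values, start, end, value):
--     while start != end:
--         mid = (start + end) // 2 + (start + end) % 2
--         if values[mid] >= value:
--             end = mid - 1
--         else:
--             start = mid
--     return start
-- ===== SOURCE B (Python) =====
-- def largest_smaller(values, start, end, value):
--     def go(lo, length):
--         if length <= 0:
--             return lo
--         step = (length + 1) // 2
--         if values[lo + step] >= value:
--             return go(lo, step - 1)
--         return go(lo + step, length - step)
--     return go(start, end - start)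
-- ===== Notes on version B (the rewrite author's own statement) =====
-- stated objective: alternative
-- what changed: Replaces the iterative two-endpoint (start,end) loop with ceiling-mid arithmetic by a recursive search over an (offset,length) state whose step is (length+1)//2, probing the identical index sequence.
-- outside the precondition, e.g. on largest_smaller([5], -3, 0, 6): A returns 0, B returns 0
import Mathlib
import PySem

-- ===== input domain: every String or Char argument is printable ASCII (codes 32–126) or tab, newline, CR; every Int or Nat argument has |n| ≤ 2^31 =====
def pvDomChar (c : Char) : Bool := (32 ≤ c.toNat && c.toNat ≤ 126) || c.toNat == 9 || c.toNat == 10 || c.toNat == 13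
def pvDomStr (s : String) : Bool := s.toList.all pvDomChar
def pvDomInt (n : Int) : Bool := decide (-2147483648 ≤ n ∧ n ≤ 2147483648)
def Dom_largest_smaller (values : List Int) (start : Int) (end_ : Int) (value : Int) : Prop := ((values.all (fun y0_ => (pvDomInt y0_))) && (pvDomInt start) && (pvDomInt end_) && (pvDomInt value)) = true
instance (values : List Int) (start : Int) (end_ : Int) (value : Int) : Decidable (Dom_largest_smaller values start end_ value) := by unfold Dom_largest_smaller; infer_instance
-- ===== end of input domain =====

-- B re-decomposes A's iterative (start,end) ceiling-mid binary search as a recursion over an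
-- (offset,length) state with step (length+1)//2; same probe sequence, same return value.


-- ===== PORT A =====
-- Python's ceiling midpoint (start + end) // 2 + (start + end) % 2
def pvMid (s e : Int) : Int := PySem.Int.floordiv (s + e) 2 + PySem.Int.mod (s + e) 2

-- cited by the port's decreasing_by
theorem pvMid_bounds (s e : Int) (h : s < e) : s < pvMid s e ∧ pvMid s e ≤ e := by
  unfold pvMid
  rw [PySem.Int.floordiv_eq_ediv_of_pos (by omega), PySem.Int.mod_eq_emod_of_pos (by omega)]
  omega

-- the while loop of A, as structural recursion on the interval width; the dite guard and the
-- `none => start` arm only make the recursion total (outside Pre_ A diverges resp. raises there)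
def largest_smaller (values : List Int) (start : Int) (end_ : Int) (value : Int) : Int :=
  if start = end_ then start
  else if _h : start < end_ then
    let mid := pvMid start end_
    match PySem.List.pyGet? values mid with
    | none => start                       -- Python: IndexError (excluded by Pre_)
    | some v =>
      if v ≥ value then largest_smaller values start (mid - 1) value
      else largest_smaller values mid end_ value
  else start                              -- Python: infinite loop (excluded by Pre_)
termination_by (end_ - start).toNat
decreasing_by
  · have := pvMid_bounds start end_ _h; omega
  · have := pvMid_bounds start end_ _h; omega

-- ===== PORT B =====
-- the step (length + 1) // 2 of Source B
def pvStep (length : Int) : Int := PySem.Int.floordiv (length + 1) 2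

-- cited by the port's decreasing_by
theorem pvStep_bounds (length : Int) (h : 0 < length) : 1 ≤ pvStep length ∧ pvStep length ≤ length := by
  unfold pvStep
  rw [PySem.Int.floordiv_eq_ediv_of_pos (by omega)]
  omega

-- the inner recursion `go` of Source B; `none => lo` only makes it total (excluded by Pre_)
def pvGo (values : List Int) (value : Int) (lo : Int) (length : Int) : Int :=
  if length ≤ 0 then lo
  else
    let step := pvStep length
    match PySem.List.pyGet? values (lo + step) with
    | none => lo                          -- Python: IndexError (excluded by Pre_)
    | some v =>
      if v ≥ value then pvGo values value lo (step - 1)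
      else pvGo values value (lo + step) (length - step)
termination_by length.toNat
decreasing_by
  · have := pvStep_bounds length (by omega); omega
  · have := pvStep_bounds length (by omega); omega

def largest_smaller_alt (values : List Int) (start : Int) (end_ : Int) (value : Int) : Int :=
  pvGo values value start (end_ - start)

-- ===== PRECONDITION & SPEC =====
-- Pre_ excludes inputs where A never returns: start > end_ makes A loop forever, and a probe
-- outside [-len, len) raises IndexError; a few deep-negative starts (start + 1 < -len) happen to
-- terminate via Python's negative-index wraparound and are conservatively excluded too (B agrees
-- with A there as well, see the cite).
def Pre_largest_smaller (values : List Int) (start : Int) (end_ : Int) (value : Int) : Prop :=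
  start = end_ ∨ (start < end_ ∧ -(values.length : Int) ≤ start + 1 ∧ end_ < values.length)
instance (values : List Int) (start : Int) (end_ : Int) (value : Int) : Decidable (Pre_largest_smaller values start end_ value) := by unfold Pre_largest_smaller; infer_instance
def pvWitness_largest_smaller : List Int × Int × Int × Int := ([1, 3, 5, 7], 0, 3, 6)

def Spec_largest_smaller (values : List Int) (start : Int) (end_ : Int) (value : Int) (out : Int) : Prop := out = largest_smaller_alt values start end_ value
instance (values : List Int) (start : Int) (end_ : Int) (value : Int) (out : Int) : Decidable (Spec_largest_smaller values start end_ value out) := by unfold Spec_largest_smaller; infer_instance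

-- ===== CLAIM (what is proved, stated in full; the proofs are below) =====
def Claim_equal_largest_smaller : Prop := ∀ (values : List Int) (start : Int) (end_ : Int) (value : Int), Dom_largest_smaller values start end_ value → Pre_largest_smaller values start end_ value → Spec_largest_smaller values start end_ value (largest_smaller values start end_ value)

-- ===== LEMMAS AND PROOFS =====

-- A's ceiling midpoint is B's offset + step
theorem pvMid_eq_add_step (s e : Int) : pvMid s e = s + pvStep (e - s) := by
  unfold pvMid pvStep
  rw [PySem.Int.floordiv_eq_ediv_of_pos (b := 2) (by omega),
      PySem.Int.mod_eq_emod_of_pos (b := 2) (by omega),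
      PySem.Int.floordiv_eq_ediv_of_pos (b := 2) (by omega)]
  omega

-- the two recursions coincide on all inputs (the ports are total; on inputs outside Pre_ both
-- take the same totalising arms)
theorem go_eq (values : List Int) (value : Int) :
    ∀ (n : Nat) (s e : Int), (e - s).toNat = n →
      largest_smaller values s e value = pvGo values value s (e - s) := by
  intro n
  induction n using Nat.strong_induction_on with
  | _ n ih =>
    intro s e hn
    rw [largest_smaller, pvGo]
    by_cases hse : s = e
    · simp [hse]
    · simp only [hse, if_false]
      by_cases hlt : s < e
      · have hmid := pvMid_bounds s e hlt
        have hstep := pvStep_bounds (e - s) (by omega)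
        have hme : pvMid s e = s + pvStep (e - s) := pvMid_eq_add_step s e
        simp only [dif_pos hlt, if_neg (by omega : ¬ e - s ≤ 0), hme]
        cases hget : PySem.List.pyGet? values (s + pvStep (e - s)) with
        | none => rfl
        | some v =>
          by_cases hv : v ≥ value
          · simp only [if_pos hv]
            have := ih ((s + pvStep (e - s) - 1) - s).toNat (by omega)
              s (s + pvStep (e - s) - 1) rfl
            rw [this]
            congr 1
            omega
          · simp only [if_neg hv]
            have := ih (e - (s + pvStep (e - s))).toNat (by omega)
              (s + pvStep (e - s)) e rfl
            rw [this]
            congr 1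
            omega
      · simp only [dif_neg hlt, if_pos (by omega : e - s ≤ 0)]

-- ===== VERDICT (by name: the statement is the Claim_ definition above) =====
theorem largest_smaller_spec : Claim_equal_largest_smaller := by
  intro values start end_ value _ _
  unfold Spec_largest_smaller largest_smaller_alt
  exact go_eq values value (end_ - start).toNat start end_ rfl
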